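-- pv_equiv track=rewrite | github.com/jeromwolf/flux-platform | domains/maritime/n10s/owl_exporter.py | _camel_to_label
-- ===== SOURCE A (Python) =====
-- def _camel_to_label(camel: str) -> str:
--     """Convert PascalCase to a human-readable label with spaces.
--
--     Args:
--         camel: e.g. ``"PhysicalEntity"``.
--
--     Returns:
--         Spaced label, e.g. ``"Physical Entity"``.
--
--     Examples:
--         >>> _camel_to_label("PhysicalEntity")
--         'Physical Entity'
--         >>> _camel_to_label("KRISOEntity")
--         'KRISO Entity'
--     """
--     result: list[str] = []
--     buf: list[str] = []
--     for ch in camel: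
--         if ch.isupper():
--             if buf:
--                 # 연속 대문자(KRISO 같은 약어) 처리
--                 if len(buf) > 1 and buf[-1].isupper():
--                     # 이전까지 약어, 현재 대문자는 새 단어 시작일 수도 있음
--                     pass
--                 # 소문자 다음 대문자면 단어 경계
--                 if buf[-1].islower():
--                     result.append("".join(buf))
--                     buf = []
--                 # 대문자 연속 중 다음 문자를 봐야 하지만, 간이 처리
--                 elif len(buf) >= 2 and buf[-1].isupper():
--                     # 약어 끝 판별은 다음 문자가 소문자인지로 (여기서는 ch 가 대문자)
--                     pass
--             buf.append(ch)
--         else: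
--             # 소문자: 약어 종료 지점 감지
--             if len(buf) >= 2 and buf[-1].isupper() and buf[-2].isupper():
--                 # 마지막 대문자를 떼어서 새 단어로
--                 prefix = "".join(buf[:-1])
--                 result.append(prefix)
--                 buf = [buf[-1], ch]
--             else:
--                 buf.append(ch)
--     if buf:
--         result.append("".join(buf))
--     return " ".join(result)
-- ===== SOURCE B (Python) =====
-- def _camel_to_label(camel: str) -> str:
--     # Stateless local rule: a word boundary falls before character i exactly when
--     # it is uppercase and either follows a lowercase char, or follows an uppercase
--     # char while the next char exists and is not uppercase (end of an acronym run).
--     n = len(camel)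
--     out = []
--     for i, ch in enumerate(camel):
--         if i > 0 and ch.isupper():
--             p = camel[i - 1]
--             if p.islower() or (p.isupper() and i + 1 < n and not camel[i + 1].isupper()):
--                 out.append(" ")
--         out.append(ch)
--     return "".join(out)
-- ===== Notes on version B (the rewrite author's own statement) =====
-- stated objective: simpler
-- what changed: A's stateful machine (a list of finished words plus a mutable current-word buffer that is flushed or split on boundaries, then joined) is replaced by a stateless single pass that inserts a space before a character exactly when a local three-character window (lookbehind one, lookahead one) says it starts a new word.
import Mathlib
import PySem

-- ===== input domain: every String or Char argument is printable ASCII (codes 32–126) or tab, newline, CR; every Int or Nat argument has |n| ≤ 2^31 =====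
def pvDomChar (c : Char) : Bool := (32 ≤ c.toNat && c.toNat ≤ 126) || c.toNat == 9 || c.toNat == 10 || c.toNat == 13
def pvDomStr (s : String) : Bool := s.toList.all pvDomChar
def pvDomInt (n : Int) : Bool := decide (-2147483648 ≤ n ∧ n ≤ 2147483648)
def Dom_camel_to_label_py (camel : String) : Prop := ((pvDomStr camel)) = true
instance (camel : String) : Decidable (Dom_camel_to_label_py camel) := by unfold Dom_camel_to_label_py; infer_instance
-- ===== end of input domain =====

-- B replaces A's stateful result/buf word-buffer machine by a stateless local boundary
-- rule (one char of lookbehind, one of lookahead); objective: simpler, same O(n) cost.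

-- ===== PORT A =====
-- A's loop body. result / buf are the list of finished words / the chars of the current
-- word ("".join(buf) is buf itself). buf[-1] and buf[-2] are read only under the guards
-- 'if buf' / 'len(buf) >= 2', so the .getD ' ' default is never the value used.
def pvAStep (st : List (List Char) × List Char) (ch : Char) : List (List Char) × List Char :=
  let result := st.1
  let buf := st.2
  if PySem.Chars.isupper ch then
    if !buf.isEmpty && PySem.Chars.islower (buf.getLast?.getD ' ') then
      (result ++ [buf], [ch])
    else
      (result, buf ++ [ch])
  else
    if decide (2 ≤ buf.length) && PySem.Chars.isupper (buf.getLast?.getD ' ')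
        && PySem.Chars.isupper (buf.dropLast.getLast?.getD ' ') then
      (result ++ [buf.dropLast], [buf.getLast?.getD ' ', ch])
    else
      (result, buf ++ [ch])

-- the trailing 'if buf: result.append("".join(buf))'
def pvFinish (st : List (List Char) × List Char) : List (List Char) :=
  if st.2.isEmpty then st.1 else st.1 ++ [st.2]

def camel_to_label_py (camel : String) : String :=
  String.mk (PySem.Chars.join [' '] (pvFinish (camel.toList.foldl pvAStep ([], []))))

-- ===== PORT B =====
-- Source B's index loop, ported as a recursion carrying prev = camel[i-1]; the lookahead
-- 'i + 1 < n and camel[i+1]' is the head of rest (exact for these in-range indices).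
def pvBGo (p : Char) (cs : List Char) : List Char :=
  match cs with
  | [] => []
  | c :: rest =>
    (if PySem.Chars.isupper c &&
        (PySem.Chars.islower p ||
          (PySem.Chars.isupper p &&
            (match rest with | [] => false | r :: _ => !PySem.Chars.isupper r))) then
      [' ', c]
    else [c]) ++ pvBGo c rest

def camel_to_label_py_alt (camel : String) : String :=
  match camel.toList with
  | [] => ""
  | c :: rest => String.mk (c :: pvBGo c rest)

-- ===== PRECONDITION & SPEC =====
def Spec_camel_to_label_py (camel : String) (out : String) : Prop := out = camel_to_label_py_alt camel
instance (camel : String) (out : String) : Decidable (Spec_camel_to_label_py camel out) := by unfold Spec_camel_to_label_py; infer_instance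

-- ===== CLAIM (what is proved, stated in full; the proofs are below) =====
def Claim_equal_camel_to_label_py : Prop := ∀ (camel : String), Dom_camel_to_label_py camel → Spec_camel_to_label_py camel (camel_to_label_py camel)

-- ===== LEMMAS AND PROOFS =====

-- 'does rest start with a non-uppercase char' (B's lookahead test)
def pvNextNonUp (rest : List Char) : Bool :=
  match rest with | [] => false | r :: _ => !PySem.Chars.isupper r

-- the space A will still insert before buf's last char once the next char arrives
def pvPend (buf rest : List Char) : List Char :=
  if decide (2 ≤ buf.length) && PySem.Chars.isupper (buf.getLast?.getD ' ')
      && PySem.Chars.isupper (buf.dropLast.getLast?.getD ' ') && pvNextNonUp rest then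
    [' ']
  else []

lemma pvDL (l : List Char) (h : l ≠ []) : l.dropLast ++ [l.getLast?.getD ' '] = l := by
  rw [List.getLast?_eq_some_getLast h, Option.getD_some]
  exact List.dropLast_concat_getLast h

-- joining with " " cannot tell two adjacent words from one word with the space inside
lemma pvJoinMerge (xs : List (List Char)) (a b : List Char) :
    PySem.Chars.join [' '] (xs ++ [a, b]) = PySem.Chars.join [' '] (xs ++ [a ++ ' ' :: b]) := by
  induction xs with
  | nil =>
    simp [PySem.Chars.join_cons_cons, PySem.Chars.join_singleton]
  | cons x xs ih =>
    cases xs with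
    | nil =>
      simp [PySem.Chars.join_cons_cons, PySem.Chars.join_singleton]
    | cons y ys =>
      simpa [PySem.Chars.join_cons_cons] using ih

-- invariant of A's loop: from a NONEMPTY buffer, what A will eventually render is the
-- words so far, then buf with a possibly pending acronym space before its last char,
-- then B's stream from prev = buf's last char.
lemma pvMain (rest : List Char) : ∀ (res : List (List Char)) (buf : List Char), buf ≠ [] →
    PySem.Chars.join [' '] (pvFinish (rest.foldl pvAStep (res, buf)))
      = PySem.Chars.join [' ']
          (res ++ [buf.dropLast ++ pvPend buf rest ++ [buf.getLast?.getD ' '] ++ pvBGo (buf.getLast?.getD ' ') rest]) := by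
  induction rest with
  | nil =>
    intro res buf hbuf
    have hbe : buf.isEmpty = false := by simp [hbuf]
    have hword : buf.dropLast ++ pvPend buf [] ++ [buf.getLast?.getD ' '] ++ pvBGo (buf.getLast?.getD ' ') [] = buf := by
      rw [show pvPend buf [] = [] by simp [pvPend, pvNextNonUp], show pvBGo (buf.getLast?.getD ' ') [] = [] from rfl,
          List.append_nil, List.append_nil]
      exact pvDL buf hbuf
    rw [List.foldl_nil, hword]
    simp [pvFinish, hbe]
  | cons c rest' ih =>
    intro res buf hbuf
    have hbe : buf.isEmpty = false := by simp [hbuf]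
    rw [List.foldl_cons]
    by_cases hup : PySem.Chars.isupper c = true
    · by_cases hlow : PySem.Chars.islower (buf.getLast?.getD ' ') = true
      · -- flush: lowercase-before-uppercase boundary
        have hstep : pvAStep (res, buf) c = (res ++ [buf], [c]) := by
          simp [pvAStep, hup, hlow, hbe]
        rw [hstep, ih (res ++ [buf]) [c] (by simp)]
        have hword : ([c] : List Char).dropLast ++ pvPend [c] rest' ++ [([c] : List Char).getLast?.getD ' ']
            ++ pvBGo (([c] : List Char).getLast?.getD ' ') rest' = c :: pvBGo c rest' := by
          simp [pvPend]
        have hword2 : buf.dropLast ++ pvPend buf (c :: rest') ++ [buf.getLast?.getD ' ']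
            ++ pvBGo (buf.getLast?.getD ' ') (c :: rest') = buf ++ ' ' :: c :: pvBGo c rest' := by
          rw [show pvPend buf (c :: rest') = [] by simp [pvPend, pvNextNonUp, hup],
              show pvBGo (buf.getLast?.getD ' ') (c :: rest') = ' ' :: c :: pvBGo c rest' by simp [pvBGo, hup, hlow],
              List.append_nil, List.append_assoc, ← List.append_assoc _ _ (' ' :: c :: pvBGo c rest'), pvDL buf hbuf]
        rw [hword, hword2,
            show res ++ [buf] ++ [c :: pvBGo c rest'] = res ++ [buf, c :: pvBGo c rest'] by simp]
        exact pvJoinMerge res buf (c :: pvBGo c rest')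
      · -- uppercase run continues
        have hlow' : PySem.Chars.islower (buf.getLast?.getD ' ') = false := by simpa using hlow
        have hstep : pvAStep (res, buf) c = (res, buf ++ [c]) := by
          simp [pvAStep, hup, hlow', hbe]
        rw [hstep, ih res (buf ++ [c]) (by simp)]
        congr 2
        have h2 : 2 ≤ (buf ++ [c]).length := by
          cases buf with
          | nil => exact absurd rfl hbuf
          | cons _ _ => simp
        have hdl : (buf ++ [c]).dropLast = buf := by simp
        have hgl : (buf ++ [c]).getLast?.getD ' ' = c := by simp
        have hBequal : pvBGo (buf.getLast?.getD ' ') (c :: rest')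
            = pvPend (buf ++ [c]) rest' ++ [c] ++ pvBGo c rest' := by
          have h1 : 1 ≤ buf.length := List.length_pos_of_ne_nil hbuf
          cases rest' with
          | nil => simp [pvBGo, pvPend, pvNextNonUp, hdl, hup, hlow']
          | cons r rs =>
            by_cases hpu : PySem.Chars.isupper (buf.getLast?.getD ' ') = true <;>
              by_cases hr : PySem.Chars.isupper r = true <;>
                simp [pvBGo, pvPend, pvNextNonUp, hdl, h1, hup, hlow', hpu, hr]
        rw [hdl, hgl, hBequal,
            show pvPend buf (c :: rest') = [] by simp [pvPend, pvNextNonUp, hup]]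
        simp only [List.append_nil]
        rw [pvDL buf hbuf]
        simp [List.append_assoc]
    · have hup' : PySem.Chars.isupper c = false := by simpa using hup
      by_cases habb : (decide (2 ≤ buf.length) && PySem.Chars.isupper (buf.getLast?.getD ' ')
          && PySem.Chars.isupper (buf.dropLast.getLast?.getD ' ')) = true
      · -- acronym split: the previous uppercase becomes the head of a new word
        have hstep : pvAStep (res, buf) c = (res ++ [buf.dropLast], [buf.getLast?.getD ' ', c]) := by
          simp only [pvAStep, hup', Bool.false_eq_true, if_false, habb, if_true]
        rw [hstep, ih (res ++ [buf.dropLast]) [buf.getLast?.getD ' ', c] (by simp)]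
        have hword : ([buf.getLast?.getD ' ', c] : List Char).dropLast
            ++ pvPend [buf.getLast?.getD ' ', c] rest'
            ++ [([buf.getLast?.getD ' ', c] : List Char).getLast?.getD ' ']
            ++ pvBGo (([buf.getLast?.getD ' ', c] : List Char).getLast?.getD ' ') rest'
            = buf.getLast?.getD ' ' :: c :: pvBGo c rest' := by
          simp [pvPend, hup']
        have hword2 : buf.dropLast ++ pvPend buf (c :: rest') ++ [buf.getLast?.getD ' ']
            ++ pvBGo (buf.getLast?.getD ' ') (c :: rest')
            = buf.dropLast ++ ' ' :: buf.getLast?.getD ' ' :: c :: pvBGo c rest' := by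
          rw [show pvPend buf (c :: rest') = [' '] by
                simp only [pvPend, pvNextNonUp, hup', Bool.not_false, Bool.and_true, habb, if_true],
              show pvBGo (buf.getLast?.getD ' ') (c :: rest') = c :: pvBGo c rest' by simp [pvBGo, hup']]
          simp
        rw [hword, hword2,
            show res ++ [buf.dropLast] ++ [buf.getLast?.getD ' ' :: c :: pvBGo c rest']
              = res ++ [buf.dropLast, buf.getLast?.getD ' ' :: c :: pvBGo c rest'] by simp]
        exact pvJoinMerge res buf.dropLast (buf.getLast?.getD ' ' :: c :: pvBGo c rest')
      · -- ordinary lowercase/other char appended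
        have habb' : (decide (2 ≤ buf.length) && PySem.Chars.isupper (buf.getLast?.getD ' ')
            && PySem.Chars.isupper (buf.dropLast.getLast?.getD ' ')) = false := by simpa using habb
        have hstep : pvAStep (res, buf) c = (res, buf ++ [c]) := by
          simp only [pvAStep, hup', Bool.false_eq_true, if_false, habb', if_false]
        rw [hstep, ih res (buf ++ [c]) (by simp)]
        congr 2
        have hdl : (buf ++ [c]).dropLast = buf := by simp
        have hgl : (buf ++ [c]).getLast?.getD ' ' = c := by simp
        have hpq : pvPend buf (c :: rest') = [] := by
          have hn : pvNextNonUp (c :: rest') = true := by simp [pvNextNonUp, hup']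
          simp only [pvPend, hn, Bool.and_true, habb', Bool.false_eq_true, if_false]
        rw [hdl, hgl, hpq,
            show pvPend (buf ++ [c]) rest' = [] by simp [pvPend, hdl, hup'],
            show pvBGo (buf.getLast?.getD ' ') (c :: rest') = c :: pvBGo c rest' by simp [pvBGo, hup']]
        simp only [List.append_nil]
        rw [pvDL buf hbuf]
        simp [List.append_assoc]

lemma pvEq (camel : String) : camel_to_label_py camel = camel_to_label_py_alt camel := by
  unfold camel_to_label_py camel_to_label_py_alt
  cases hc : camel.toList with
  | nil => rfl
  | cons c rest =>
    have hstep : pvAStep ([], []) c = ([], [c]) := by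
      by_cases hup : PySem.Chars.isupper c = true <;> simp [pvAStep, hup]
    rw [List.foldl_cons, hstep, pvMain rest [] [c] (by simp)]
    have hword : ([c] : List Char).dropLast ++ pvPend [c] rest ++ [([c] : List Char).getLast?.getD ' ']
        ++ pvBGo (([c] : List Char).getLast?.getD ' ') rest = c :: pvBGo c rest := by
      simp [pvPend]
    rw [hword]
    simp [PySem.Chars.join_singleton]

-- ===== VERDICT (by name: the statement is the Claim_ definition above) =====
theorem camel_to_label_py_spec : Claim_equal_camel_to_label_py := by
  intro camel _
  exact pvEq camel
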